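-- pv_equiv track=rewrite | github.com/roy029/papertown_addm | papertown/papertown_dataset.py | _block_simply
-- ===== SOURCE A (Python) =====
-- from typing import List
--
-- DEFAULT_BLOCK_SIZE = 2048
--
-- empty_tokens = []
--
-- def _block_simply(blocks: List[List[int]], tokens: List[int], block_size=DEFAULT_BLOCK_SIZE, fill=empty_tokens):
--     # とりあえず、シンプルにブロックを分割する
--     for i in range(0, len(tokens) - block_size + 1, block_size):
--         segmented = tokens[i : i + block_size]
--         blocks.append(segmented)
--     remaining = len(tokens) % block_size
--     if remaining == 0: # 最後の分割が揃っていればおしまい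
--         return fill
--     remaining_tokens = tokens[-remaining:] + fill
--     while len(remaining_tokens) >= block_size:
--         blocks.append(remaining_tokens[:block_size])
--         remaining_tokens = remaining_tokens[block_size:]
--     return remaining_tokens
-- ===== SOURCE B (Python) =====
-- from typing import List
--
-- DEFAULT_BLOCK_SIZE = 2048
--
-- empty_tokens = []
--
-- def _block_simply(blocks: List[List[int]], tokens: List[int], block_size=DEFAULT_BLOCK_SIZE, fill=empty_tokens):
--     # One uniform chunking pass over a single combined buffer.
--     r = len(tokens) % block_size
--     buf = tokens if r == 0 else tokens + fill
--     i = 0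
--     while i + block_size <= len(buf):
--         blocks.append(buf[i:i + block_size])
--         i += block_size
--     return fill if r == 0 else buf[i:]
-- ===== Notes on version B (the rewrite author's own statement) =====
-- stated objective: simpler
-- what changed: Replaces A's two-phase chunk-tokens / re-chunk-remainder-plus-fill scheme by one uniform index loop over a single conditionally-combined buffer (tokens, or tokens+fill when a remainder exists), returning the leftover tail.
-- outside the precondition, e.g. on _block_simply([], [], 0, []): A raises ValueError, B raises ZeroDivisionError; on _block_simply([], [], -2, [5]): A returns [5], B does not finish within the time limit
import Mathlib
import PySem

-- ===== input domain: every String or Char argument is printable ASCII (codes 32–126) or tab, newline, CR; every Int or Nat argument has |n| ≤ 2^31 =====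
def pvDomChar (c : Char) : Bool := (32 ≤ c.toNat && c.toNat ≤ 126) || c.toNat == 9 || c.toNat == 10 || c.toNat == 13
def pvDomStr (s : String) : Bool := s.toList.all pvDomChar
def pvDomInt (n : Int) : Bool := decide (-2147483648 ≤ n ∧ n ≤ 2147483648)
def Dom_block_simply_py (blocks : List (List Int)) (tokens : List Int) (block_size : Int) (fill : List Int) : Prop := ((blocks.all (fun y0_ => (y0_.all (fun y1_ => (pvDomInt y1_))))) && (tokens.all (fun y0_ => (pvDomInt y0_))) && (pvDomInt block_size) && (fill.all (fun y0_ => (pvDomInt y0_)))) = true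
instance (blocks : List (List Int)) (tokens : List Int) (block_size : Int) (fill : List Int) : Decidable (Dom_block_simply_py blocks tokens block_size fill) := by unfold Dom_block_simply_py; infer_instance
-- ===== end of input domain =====

-- B replaces A's two-phase chunk/remainder-rechunk by one uniform chunking loop over a
-- conditionally combined buffer (equal return value; both Pythons append the same chunks to `blocks`,
-- the mutation itself is outside the proved equivalence).


-- ===== PORT A =====
-- `while len(remaining_tokens) >= block_size: remaining_tokens = remaining_tokens[block_size:]`
-- (the appended prefix goes to `blocks`, a side effect not part of the return value).
-- The `1 ≤ block_size` conjunct only makes the recursion total; Pre_ guarantees it.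
def aWhile (block_size : Int) (remaining_tokens : List Int) : List Int :=
  if h : 1 ≤ block_size ∧ block_size ≤ (remaining_tokens.length : Int) then
    aWhile block_size (PySem.List.slice remaining_tokens (some block_size) none)
  else remaining_tokens
termination_by remaining_tokens.length
decreasing_by
  rw [PySem.List.slice_from _ (by omega)]
  simp only [List.length_drop]
  omega

def block_simply_py (blocks : List (List Int)) (tokens : List Int) (block_size : Int) (fill : List Int) : List Int :=
  -- the initial `for` loop only appends to `blocks`; it does not affect the return value.
  -- `remaining` is inlined; the two-phase structure (remainder slice + fill, then the while loop) is A's.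
  if PySem.Int.mod (tokens.length : Int) block_size = 0 then fill
  else aWhile block_size (PySem.List.slice tokens (some (-(PySem.Int.mod (tokens.length : Int) block_size))) none ++ fill)

-- ===== PORT B =====
-- `while i + block_size <= len(buf): i += block_size` (blocks.append is a side effect);
-- the `1 ≤ block_size` conjunct only makes the recursion total; Pre_ guarantees it.
def bLoop (block_size : Int) (bufLen : Int) (i : Int) : Int :=
  if h : 1 ≤ block_size ∧ i + block_size ≤ bufLen then
    bLoop block_size bufLen (i + block_size)
  else i
termination_by (bufLen - i).toNat
decreasing_by omega

def block_simply_py_alt (blocks : List (List Int)) (tokens : List Int) (block_size : Int) (fill : List Int) : List Int :=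
  -- when r = 0 the function returns `fill` and `buf` is unused for the return value,
  -- so `buf = tokens ++ fill` appears only in the else branch; the index loop is B's.
  if PySem.Int.mod (tokens.length : Int) block_size = 0 then fill
  else PySem.List.slice (tokens ++ fill)
         (some (bLoop block_size ((tokens ++ fill).length : Int) 0)) none

-- ===== PRECONDITION & SPEC =====
-- Pre_ excludes block_size ≤ 0: at 0 A raises ValueError (range step 0); for negative block_size A
-- loops forever except in the accidental case block_size ∣ len(tokens), where it returns fill while B diverges.
def Pre_block_simply_py (blocks : List (List Int)) (tokens : List Int) (block_size : Int) (fill : List Int) : Prop :=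
  1 ≤ block_size
instance (blocks : List (List Int)) (tokens : List Int) (block_size : Int) (fill : List Int) : Decidable (Pre_block_simply_py blocks tokens block_size fill) := by unfold Pre_block_simply_py; infer_instance

def pvWitness_block_simply_py : List (List Int) × List Int × Int × List Int := ([], [1, 2, 3], 2, [9])

def Spec_block_simply_py (blocks : List (List Int)) (tokens : List Int) (block_size : Int) (fill : List Int) (out : List Int) : Prop := out = block_simply_py_alt blocks tokens block_size fill
instance (blocks : List (List Int)) (tokens : List Int) (block_size : Int) (fill : List Int) (out : List Int) : Decidable (Spec_block_simply_py blocks tokens block_size fill out) := by unfold Spec_block_simply_py; infer_instance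

-- ===== CLAIM (what is proved, stated in full; the proofs are below) =====
def Claim_equal_block_simply_py : Prop := ∀ (blocks : List (List Int)) (tokens : List Int) (block_size : Int) (fill : List Int), Dom_block_simply_py blocks tokens block_size fill → Pre_block_simply_py blocks tokens block_size fill → Spec_block_simply_py blocks tokens block_size fill (block_simply_py blocks tokens block_size fill)

-- ===== LEMMAS AND PROOFS =====

-- shared arithmetic step of both loop closed forms
lemma step_div (M n : Nat) (hn : 1 ≤ n) (hM : n ≤ M) :
    n + (M - n) / n * n = M / n * n := by
  obtain ⟨k, hk⟩ : ∃ k, M = n + k := ⟨M - n, by omega⟩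
  subst hk
  simp only [Nat.add_sub_cancel_left]
  rw [Nat.add_div_left _ (by omega)]
  ring

-- A's while loop drops block_size-sized prefixes: closed form
lemma aWhile_eq (b : Int) (hb : 1 ≤ b) (rt : List Int) :
    aWhile b rt = rt.drop (rt.length / b.toNat * b.toNat) := by
  generalize hL : rt.length = L
  induction L using Nat.strong_induction_on generalizing rt with
  | _ L ih =>
    rw [aWhile]
    by_cases hc : b ≤ (rt.length : Int)
    · rw [dif_pos ⟨hb, hc⟩, PySem.List.slice_from _ (by omega)]
      have hbn : b.toNat ≤ rt.length := by omega
      have hlen : (rt.drop b.toNat).length = rt.length - b.toNat := by simp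
      rw [ih (rt.length - b.toNat) (by omega) _ hlen, List.drop_drop, ← hL]
      congr 1
      exact step_div rt.length b.toNat (by omega) hbn
    · rw [dif_neg (by tauto), ← hL, Nat.div_eq_of_lt (by omega)]
      simp

-- B's index loop: closed form of the final index
lemma bLoop_eq (b : Int) (hb : 1 ≤ b) (L i : Int) (hi : 0 ≤ i) (hiL : i ≤ L) :
    bLoop b L i = i + (((L - i).toNat / b.toNat * b.toNat : Nat) : Int) := by
  generalize hM : (L - i).toNat = M
  induction M using Nat.strong_induction_on generalizing i with
  | _ M ih =>
    rw [bLoop]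
    by_cases hc : i + b ≤ L
    · rw [dif_pos ⟨hb, hc⟩]
      have hM' : (L - (i + b)).toNat = M - b.toNat := by omega
      rw [ih (M - b.toNat) (by omega) (i + b) (by omega) hc hM']
      have h2 := step_div M b.toNat (by omega) (by omega)
      omega
    · rw [dif_neg (by tauto), Nat.div_eq_of_lt (by omega)]
      simp

-- ===== VERDICT (by name: the statement is the Claim_ definition above) =====
theorem block_simply_py_spec : Claim_equal_block_simply_py := by
  intro blocks tokens b fill _ hpre
  have hb : 1 ≤ b := hpre
  have hbn : (b.toNat : Int) = b := Int.toNat_of_nonneg (by omega)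
  unfold Spec_block_simply_py block_simply_py block_simply_py_alt
  set n := b.toNat with hn
  have hmod : PySem.Int.mod (tokens.length : Int) b = ((tokens.length % n : Nat) : Int) := by
    rw [← hbn]; exact PySem.Int.mod_natCast _ _
  by_cases h0 : PySem.Int.mod (tokens.length : Int) b = 0
  · rw [if_pos h0, if_pos h0]
  · rw [if_neg h0, if_neg h0]
    set len := tokens.length with hlen
    set f := fill.length with hf
    have hnpos : 0 < n := by omega
    have hspos : 0 < len % n := by
      rcases Nat.eq_zero_or_pos (len % n) with h | h
      · exact absurd (by rw [hmod, h]; rfl) h0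
      · exact h
    have hslt : len % n < n := Nat.mod_lt _ hnpos
    have hsle : len % n ≤ len := Nat.mod_le _ _
    rw [hmod, PySem.List.slice_from_neg_natCast tokens _ hspos]
    rw [aWhile_eq b hb]
    rw [show ((tokens ++ fill).length : Int) = ((len + f : Nat) : Int) by simp [hlen, hf]]
    rw [bLoop_eq b hb _ 0 le_rfl (by omega)]
    rw [show ((((len + f : Nat) : Int) - 0).toNat) = len + f by omega]
    rw [show ((0 : Int) + (((len + f) / n * n : Nat) : Int)) = (((len + f) / n * n : Nat) : Int) by omega]
    rw [PySem.List.slice_from_natCast]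
    have hlen2 : (tokens.drop (len - len % n) ++ fill).length = len % n + f := by
      simp only [List.length_append, List.length_drop, ← hlen, ← hf]
      omega
    rw [hlen2]
    simp only [← hn]
    set s := len % n with hs
    obtain ⟨q, hq⟩ : ∃ q, len = n * q + s := ⟨len / n, (Nat.div_add_mod len n).symm⟩
    have hdiv : (len + f) / n * n = n * q + (s + f) / n * n := by
      rw [hq, Nat.add_assoc, Nat.mul_add_div hnpos]
      ring
    rw [hdiv, show len - s = n * q by omega, ← List.drop_drop,
        List.drop_append_of_le_length (l₁ := tokens) (l₂ := fill) (i := n * q) (by omega)]
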